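-- pv_equiv track=rewrite | github.com/conradtchan/jobHarvest | jobHarvest.py | getjSumDelta
-- ===== SOURCE A (Python) =====
-- def getjSumDelta(jSum, jSumPrev):
--    # jSum contains all historical data points - calculate the delta between the previous and current data
--    jSumDelta = {}
--    for jobid in jSum.keys():
--       if jobid not in jSumPrev.keys():
--          # If the jobid was not in the previous data, then all points are new
--          jSumDelta[jobid] = jSum[jobid]
--          continue
--       else:
--          jSumDelta[jobid] = {}
--
--          for fs in jSum[jobid].keys():
--             # If the fs was not in the previous data, then all points are new
--             if fs not in jSumPrev[jobid].keys():
--                jSumDelta[jobid][fs] = jSum[jobid][fs]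
--                continue
--             else:
--                jSumDelta[jobid][fs] = {}
--
--             for server in jSum[jobid][fs].keys():
--                # If the server was not in the previous data, then that point is new
--                if server not in jSumPrev[jobid][fs].keys():
--                   jSumDelta[jobid][fs][server] = jSum[jobid][fs][server]
--                   continue
--
--                # Otherwise, check the timestamp to see if that point is new
--                elif jSum[jobid][fs][server]["snapshot_time"] > jSumPrev[jobid][fs][server]["snapshot_time"]:
--                      jSumDelta[jobid][fs][server] = jSum[jobid][fs][server]
--
--    return jSumDelta
-- ===== SOURCE B (Python) =====
-- def _delta(cur, prev, depth):
--     # shared inner keys always get a (possibly empty) sub-dict; the leaf level keeps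
--     # only entries that are new or strictly newer than the previous snapshot
--     if depth > 1:
--         return {k: (v if k not in prev else _delta(v, prev[k], depth - 1))
--                 for k, v in cur.items()}
--     return {k: v for k, v in cur.items()
--             if k not in prev or v["snapshot_time"] > prev[k]["snapshot_time"]}
--
--
-- def getjSumDelta(jSum, jSumPrev):
--     return _delta(jSum, jSumPrev, 3)
-- ===== Notes on version B (the rewrite author's own statement) =====
-- stated objective: simpler
-- what changed: A's triple nested loop with continue/else bookkeeping and in-place nested-dict mutation is replaced by a single recursive helper _delta(cur, prev, depth): inner levels are a total dict comprehension (map), the leaf level a filtering comprehension.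
import Mathlib
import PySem

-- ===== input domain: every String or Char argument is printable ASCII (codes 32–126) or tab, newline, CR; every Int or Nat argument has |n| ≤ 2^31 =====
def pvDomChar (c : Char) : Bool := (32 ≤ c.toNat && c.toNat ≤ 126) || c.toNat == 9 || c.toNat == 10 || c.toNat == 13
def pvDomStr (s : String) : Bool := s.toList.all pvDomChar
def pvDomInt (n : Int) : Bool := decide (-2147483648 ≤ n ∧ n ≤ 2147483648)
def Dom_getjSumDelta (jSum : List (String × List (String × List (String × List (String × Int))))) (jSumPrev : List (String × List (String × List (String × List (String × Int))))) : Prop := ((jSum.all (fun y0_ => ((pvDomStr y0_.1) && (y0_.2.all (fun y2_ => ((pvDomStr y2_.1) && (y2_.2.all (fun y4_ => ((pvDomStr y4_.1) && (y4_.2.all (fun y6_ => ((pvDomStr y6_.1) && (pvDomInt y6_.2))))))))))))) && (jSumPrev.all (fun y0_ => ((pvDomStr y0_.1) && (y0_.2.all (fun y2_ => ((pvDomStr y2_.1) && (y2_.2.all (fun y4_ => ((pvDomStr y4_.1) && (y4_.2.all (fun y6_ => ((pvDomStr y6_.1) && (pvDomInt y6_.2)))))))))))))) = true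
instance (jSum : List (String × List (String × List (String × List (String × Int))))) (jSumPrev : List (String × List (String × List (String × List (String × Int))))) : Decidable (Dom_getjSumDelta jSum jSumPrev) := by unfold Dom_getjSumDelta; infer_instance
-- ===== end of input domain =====

-- ===== PORT A =====
-- B replaces A's triple nested loop with a recursive map/filter decomposition; equality of return values is
-- proved under Pre_ (no duplicate keys in the dict-encoding lists; "snapshot_time" present where A indexes it).

-- shared dict primitives: first-match lookup = Python d[k] / 'k in d'; snapshot lookup made total via
-- getD 0, which Pre_getjSumDelta restricts to the keys Python actually finds (else Python raises KeyError)
def lkp {a : Type} (d : List (String × a)) (k : String) : Option a := (PySem.Dict.mk d).get? k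
def snapT (leaf : List (String × Int)) : Int := (lkp leaf "snapshot_time").getD 0

-- literal transliteration of A: three nested loops over .keys(), building jSumDelta with dict inserts;
-- Python's "jSumDelta[jobid] = {}" followed by in-place updates of that freshly inserted entry is ported as
-- running the same inner loop into an empty dict and inserting the result once (same final dict, same order)
def getjSumDelta (jSum : List (String × List (String × List (String × List (String × Int))))) (jSumPrev : List (String × List (String × List (String × List (String × Int))))) : List (String × List (String × List (String × List (String × Int)))) :=
  (jSum.foldl (fun jSumDelta jp =>
    match lkp jSumPrev jp.1 with
    | none => jSumDelta.insert jp.1 jp.2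
    | some prevJ =>
      jSumDelta.insert jp.1
        ((jp.2.foldl (fun dJob fp =>
          match lkp prevJ fp.1 with
          | none => dJob.insert fp.1 fp.2
          | some prevF =>
            dJob.insert fp.1
              ((fp.2.foldl (fun dFs sp =>
                match lkp prevF sp.1 with
                | none => dFs.insert sp.1 sp.2
                | some prevS =>
                  if snapT sp.2 > snapT prevS then dFs.insert sp.1 sp.2 else dFs)
                PySem.Dict.empty).items))
          PySem.Dict.empty).items))
    PySem.Dict.empty).items

-- ===== PORT B =====
-- Source B's recursive _delta(cur, prev, depth) monomorphized on depth (the value types differ per level in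
-- Lean): altLeaf = the depth==1 filtering comprehension, altFs / altJob = the depth>1 mapping comprehension
def altLeaf (cur prev : List (String × List (String × Int))) : List (String × List (String × Int)) :=
  cur.filter (fun sp => match lkp prev sp.1 with
    | none => true
    | some prevS => snapT sp.2 > snapT prevS)

def altFs (cur prev : List (String × List (String × List (String × Int)))) : List (String × List (String × List (String × Int))) :=
  cur.map (fun fp => (fp.1, match lkp prev fp.1 with
    | none => fp.2
    | some prevF => altLeaf fp.2 prevF))

def altJob (cur prev : List (String × List (String × List (String × List (String × Int))))) : List (String × List (String × List (String × List (String × Int)))) :=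
  cur.map (fun jp => (jp.1, match lkp prev jp.1 with
    | none => jp.2
    | some prevJ => altFs jp.2 prevJ))

def getjSumDelta_alt (jSum : List (String × List (String × List (String × List (String × Int))))) (jSumPrev : List (String × List (String × List (String × List (String × Int))))) : List (String × List (String × List (String × List (String × Int)))) :=
  altJob jSum jSumPrev

-- ===== PRECONDITION & SPEC =====
-- Pre_ excludes (a) association lists with duplicate keys at any dict level of jSum, which do not encode
-- Python dicts at all, and (b) inputs where a leaf dict reached on a path shared by jSum and jSumPrev lacks
-- the "snapshot_time" key, on which A raises KeyError.
def preKeysOk (jSum : List (String × List (String × List (String × List (String × Int))))) : Bool :=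
  decide ((jSum.map Prod.fst).Nodup) &&
  jSum.all (fun jp => decide ((jp.2.map Prod.fst).Nodup) &&
    jp.2.all (fun fp => decide ((fp.2.map Prod.fst).Nodup)))

def preSnapOk (jSum : List (String × List (String × List (String × List (String × Int))))) (jSumPrev : List (String × List (String × List (String × List (String × Int))))) : Bool :=
  jSum.all (fun jp => match lkp jSumPrev jp.1 with
    | none => true
    | some prevJ => jp.2.all (fun fp => match lkp prevJ fp.1 with
      | none => true
      | some prevF => fp.2.all (fun sp => match lkp prevF sp.1 with
        | none => true
        | some prevS => (lkp sp.2 "snapshot_time").isSome && (lkp prevS "snapshot_time").isSome)))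

def Pre_getjSumDelta (jSum : List (String × List (String × List (String × List (String × Int))))) (jSumPrev : List (String × List (String × List (String × List (String × Int))))) : Prop :=
  preKeysOk jSum = true ∧ preSnapOk jSum jSumPrev = true
instance (jSum : List (String × List (String × List (String × List (String × Int))))) (jSumPrev : List (String × List (String × List (String × List (String × Int))))) : Decidable (Pre_getjSumDelta jSum jSumPrev) := by unfold Pre_getjSumDelta; infer_instance

def pvWitness_getjSumDelta : (List (String × List (String × List (String × List (String × Int))))) × (List (String × List (String × List (String × List (String × Int))))) :=
  ([("j1", [("fs1", [("s1", [("snapshot_time", 2), ("read", 5)])])]), ("j2", [("fs1", [("s1", [("snapshot_time", 1)])])])],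
   [("j1", [("fs1", [("s1", [("snapshot_time", 1), ("read", 3)])])])])

def Spec_getjSumDelta (jSum : List (String × List (String × List (String × List (String × Int))))) (jSumPrev : List (String × List (String × List (String × List (String × Int))))) (out : List (String × List (String × List (String × List (String × Int))))) : Prop := out = getjSumDelta_alt jSum jSumPrev
instance (jSum : List (String × List (String × List (String × List (String × Int))))) (jSumPrev : List (String × List (String × List (String × List (String × Int))))) (out : List (String × List (String × List (String × List (String × Int))))) : Decidable (Spec_getjSumDelta jSum jSumPrev out) := by
  unfold Spec_getjSumDelta
  have i1 : DecidableEq (List (String × Int)) := inferInstance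
  have i2 : DecidableEq (List (String × List (String × Int))) := @instDecidableEqList _ (@instDecidableEqProd _ _ _ i1)
  have i3 : DecidableEq (List (String × List (String × List (String × Int)))) := @instDecidableEqList _ (@instDecidableEqProd _ _ _ i2)
  have i4 : DecidableEq (List (String × List (String × List (String × List (String × Int))))) := @instDecidableEqList _ (@instDecidableEqProd _ _ _ i3)
  exact i4 out (getjSumDelta_alt jSum jSumPrev)

-- ===== CLAIM (what is proved, stated in full; the proofs are below) =====
def Claim_equal_getjSumDelta : Prop := ∀ (jSum : List (String × List (String × List (String × List (String × Int))))) (jSumPrev : List (String × List (String × List (String × List (String × Int))))), Dom_getjSumDelta jSum jSumPrev → Pre_getjSumDelta jSum jSumPrev → Spec_getjSumDelta jSum jSumPrev (getjSumDelta jSum jSumPrev)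

-- ===== LEMMAS AND PROOFS =====

-- leaf level: A's conditional-insert loop over an accumulator fresh for cur's keys equals B's filter
theorem leafA_aux (cur prev : List (String × List (String × Int)))
    (h : (cur.map Prod.fst).Nodup) (d0 : PySem.Dict String (List (String × Int)))
    (hf : ∀ p ∈ cur, d0.contains p.1 = false) :
    (cur.foldl (fun dFs sp =>
      match lkp prev sp.1 with
      | none => dFs.insert sp.1 sp.2
      | some prevS =>
        if snapT sp.2 > snapT prevS then dFs.insert sp.1 sp.2 else dFs) d0).items
    = d0.items ++ altLeaf cur prev := by
  induction cur generalizing d0 with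
  | nil => simp [altLeaf]
  | cons p rest ih =>
    simp only [List.map_cons, List.nodup_cons] at h
    have hfr : ∀ q ∈ rest, (d0.insert p.1 p.2).contains q.1 = false := by
      intro q hq
      rw [PySem.Dict.contains_insert]
      have : q.1 ≠ p.1 := by
        intro he; exact h.1 (he ▸ (List.mem_map.mpr ⟨q, hq, rfl⟩))
      simp [this, hf q (List.mem_cons_of_mem _ hq)]
    have hins : (d0.insert p.1 p.2).items = d0.items ++ [(p.1, p.2)] :=
      PySem.Dict.items_insert_of_not_contains d0 p.2 (hf p (List.mem_cons_self ..))
    cases hl : lkp prev p.1 with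
    | none =>
      simp only [List.foldl_cons, hl]
      rw [ih h.2 _ hfr, hins]
      simp [altLeaf, hl]
    | some prevS =>
      by_cases hs : snapT p.2 > snapT prevS
      · simp only [List.foldl_cons, hl, if_pos hs]
        rw [ih h.2 _ hfr, hins]
        simp [altLeaf, hl, hs]
      · simp only [List.foldl_cons, hl, if_neg hs]
        rw [ih h.2 d0 (fun q hq => hf q (List.mem_cons_of_mem _ hq))]
        simp [altLeaf, hl, hs]

-- middle level: A's loop over one job's filesystems equals B's altFs
theorem fsA_eq (cur prev : List (String × List (String × List (String × Int))))
    (h : cur.all (fun fp => decide ((fp.2.map Prod.fst).Nodup)) = true)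
    (hn : (cur.map Prod.fst).Nodup) :
    (cur.foldl (fun dJob fp =>
      match lkp prev fp.1 with
      | none => dJob.insert fp.1 fp.2
      | some prevF =>
        dJob.insert fp.1
          ((fp.2.foldl (fun dFs sp =>
            match lkp prevF sp.1 with
            | none => dFs.insert sp.1 sp.2
            | some prevS =>
              if snapT sp.2 > snapT prevS then dFs.insert sp.1 sp.2 else dFs)
            PySem.Dict.empty).items)) PySem.Dict.empty).items
    = altFs cur prev := by
  have hstep : (fun (dJob : PySem.Dict String (List (String × List (String × Int)))) (fp : String × List (String × List (String × Int))) =>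
      match lkp prev fp.1 with
      | none => dJob.insert fp.1 fp.2
      | some prevF =>
        dJob.insert fp.1
          ((fp.2.foldl (fun dFs sp =>
            match lkp prevF sp.1 with
            | none => dFs.insert sp.1 sp.2
            | some prevS =>
              if snapT sp.2 > snapT prevS then dFs.insert sp.1 sp.2 else dFs)
            PySem.Dict.empty).items))
      = (fun (dJob : PySem.Dict String (List (String × List (String × Int)))) (fp : String × List (String × List (String × Int))) => dJob.insert fp.1
          (match lkp prev fp.1 with
           | none => fp.2
           | some prevF =>
             ((fp.2.foldl (fun dFs sp =>
               match lkp prevF sp.1 with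
               | none => dFs.insert sp.1 sp.2
               | some prevS =>
                 if snapT sp.2 > snapT prevS then dFs.insert sp.1 sp.2 else dFs)
               PySem.Dict.empty).items))) := by
    funext dJob fp
    cases lkp prev fp.1 <;> rfl
  rw [hstep, PySem.Dict.items_foldl_insert_fresh cur Prod.fst _ PySem.Dict.empty
      (fun a _ => PySem.Dict.contains_empty _) hn]
  rw [show (PySem.Dict.empty : PySem.Dict String (List (String × List (String × Int)))).items = [] from rfl, List.nil_append]
  unfold altFs
  apply List.map_congr_left
  intro fp hfp
  cases hl : lkp prev fp.1 with
  | none => simp only []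
  | some prevF =>
    simp only []
    have hnod : (fp.2.map Prod.fst).Nodup :=
      of_decide_eq_true (List.all_eq_true.mp h fp hfp)
    rw [leafA_aux fp.2 prevF hnod PySem.Dict.empty (fun p _ => PySem.Dict.contains_empty _)]
    rfl

-- ===== VERDICT (by name: the statement is the Claim_ definition above) =====
theorem getjSumDelta_spec : Claim_equal_getjSumDelta := by
  intro jSum jSumPrev _ hpre
  unfold Spec_getjSumDelta getjSumDelta getjSumDelta_alt altJob
  obtain ⟨hkeys, -⟩ := hpre
  unfold preKeysOk at hkeys
  simp only [Bool.and_eq_true, List.all_eq_true, decide_eq_true_eq] at hkeys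
  have hstep : (fun (d : PySem.Dict String (List (String × List (String × List (String × Int))))) (jp : String × List (String × List (String × List (String × Int)))) =>
      match lkp jSumPrev jp.1 with
      | none => d.insert jp.1 jp.2
      | some prevJ =>
        d.insert jp.1
          ((jp.2.foldl (fun dJob fp =>
            match lkp prevJ fp.1 with
            | none => dJob.insert fp.1 fp.2
            | some prevF =>
              dJob.insert fp.1
                ((fp.2.foldl (fun dFs sp =>
                  match lkp prevF sp.1 with
                  | none => dFs.insert sp.1 sp.2
                  | some prevS =>
                    if snapT sp.2 > snapT prevS then dFs.insert sp.1 sp.2 else dFs)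
                  PySem.Dict.empty).items))
            PySem.Dict.empty).items))
      = (fun (d : PySem.Dict String (List (String × List (String × List (String × Int))))) (jp : String × List (String × List (String × List (String × Int)))) => d.insert jp.1
          (match lkp jSumPrev jp.1 with
           | none => jp.2
           | some prevJ =>
             ((jp.2.foldl (fun dJob fp =>
               match lkp prevJ fp.1 with
               | none => dJob.insert fp.1 fp.2
               | some prevF =>
                 dJob.insert fp.1
                   ((fp.2.foldl (fun dFs sp =>
                     match lkp prevF sp.1 with
                     | none => dFs.insert sp.1 sp.2
                     | some prevS =>
                       if snapT sp.2 > snapT prevS then dFs.insert sp.1 sp.2 else dFs)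
                     PySem.Dict.empty).items))
               PySem.Dict.empty).items))) := by
    funext d jp
    cases lkp jSumPrev jp.1 <;> rfl
  rw [hstep, PySem.Dict.items_foldl_insert_fresh jSum Prod.fst _ PySem.Dict.empty
      (fun a _ => PySem.Dict.contains_empty _) hkeys.1]
  rw [show (PySem.Dict.empty : PySem.Dict String (List (String × List (String × List (String × Int))))).items = [] from rfl, List.nil_append]
  apply List.map_congr_left
  intro jp hjp
  cases hl : lkp jSumPrev jp.1 with
  | none => simp only []
  | some prevJ =>
    simp only []
    obtain ⟨hn1, hn2⟩ := hkeys.2 jp hjp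
    rw [fsA_eq jp.2 prevJ (List.all_eq_true.mpr (fun fp hfp => decide_eq_true (hn2 fp hfp))) hn1]
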